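-- pv_equiv track=rewrite | github.com/panora77956/v3 | services/google/prompt_optimizer.py | _reconstruct_prompt
-- ===== SOURCE A (Python) =====
-- from typing import Dict, List, Optional, Any
--
-- def _reconstruct_prompt(sections: Dict[str, str]) -> str:
--     """Reconstruct prompt from sections"""
--     parts = []
--
--     # Order: character -> scene -> voiceover -> other
--     order = ['character', 'scene', 'voiceover', 'setting_details', 'camera_direction',
--              'hard_locks', 'negatives', 'main']
--
--     for key in order:
--         if key in sections and sections[key]:
--             parts.append(sections[key])
--
--     # Add any remaining sections
--     for key, value in sections.items():
--         if key not in order and value: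
--             parts.append(value)
--
--     return '\n\n'.join(parts)
-- ===== SOURCE B (Python) =====
-- def _reconstruct_prompt(sections):
--     """Reconstruct prompt from sections"""
--     order = ['character', 'scene', 'voiceover', 'setting_details', 'camera_direction',
--              'hard_locks', 'negatives', 'main']
--     idx = {k: i for i, k in enumerate(order)}
--     # one pass: distribute each non-empty value into its priority bucket
--     buckets = [[] for _ in range(len(order) + 1)]
--     for key, value in sections.items():
--         if value:
--             buckets[idx.get(key, len(order))].append(value)
--     return '\n\n'.join(v for bucket in buckets for v in bucket)
-- ===== Notes on version B (the rewrite author's own statement) =====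
-- stated objective: alternative
-- what changed: B makes one pass over the sections, distributing each non-empty value into one of 9 priority buckets via a precomputed key->index dict, then joins the concatenated buckets, instead of A's two scans (one dict probe per priority key, then a per-item `key not in order` list scan).
import Mathlib
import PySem

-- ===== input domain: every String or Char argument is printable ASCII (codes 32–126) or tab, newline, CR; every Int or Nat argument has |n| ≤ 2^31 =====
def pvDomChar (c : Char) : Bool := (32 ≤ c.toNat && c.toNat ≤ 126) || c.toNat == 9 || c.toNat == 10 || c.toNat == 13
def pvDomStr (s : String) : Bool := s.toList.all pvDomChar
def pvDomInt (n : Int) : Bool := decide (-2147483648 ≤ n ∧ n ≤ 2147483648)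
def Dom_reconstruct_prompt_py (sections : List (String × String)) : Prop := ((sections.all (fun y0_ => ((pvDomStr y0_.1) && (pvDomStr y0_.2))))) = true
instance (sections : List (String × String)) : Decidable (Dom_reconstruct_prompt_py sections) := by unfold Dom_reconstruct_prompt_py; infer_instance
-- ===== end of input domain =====

-- B replaces A's two scans (8 dict probes plus a linear `key not in order` scan per item) with a single
-- pass that distributes each non-empty value into one of 9 priority buckets; objective: alternative.

-- ===== PORT A =====
def reconstruct_prompt_py (sections : List (String × String)) : String :=
  let d : PySem.Dict String String := PySem.Dict.mk sections
  let order : List String := ["character", "scene", "voiceover", "setting_details",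
    "camera_direction", "hard_locks", "negatives", "main"]
  let parts : List String := order.foldl (fun parts key =>
      if d.contains key && d.getD key "" != "" then parts ++ [d.getD key ""] else parts) []
  let parts := sections.foldl (fun parts kv =>
      if !order.contains kv.1 && kv.2 != "" then parts ++ [kv.2] else parts) parts
  PySem.Str.join "\n\n" parts

-- ===== PORT B =====
def reconstruct_prompt_py_alt (sections : List (String × String)) : String :=
  let order : List String := ["character", "scene", "voiceover", "setting_details",
    "camera_direction", "hard_locks", "negatives", "main"]
  let idx : PySem.Dict String Int :=
    (PySem.List.enumerate order 0).foldl (fun d p => d.insert p.2 p.1) PySem.Dict.empty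
  let buckets : List (List String) := List.replicate (order.length + 1) []
  let buckets := sections.foldl (fun bs kv =>
      if kv.2 != "" then
        -- buckets[idx.get(key, len(order))].append(value): idx values are 0..7, so 0 ≤ j ≤ 8 and .toNat/.set are exact
        let j := (idx.getD kv.1 (order.length : Int)).toNat
        bs.set j ((bs.getD j []) ++ [kv.2])
      else bs) buckets
  PySem.Str.join "\n\n" buckets.flatten

-- ===== PRECONDITION & SPEC =====
-- Pre_ excludes association lists with duplicate keys: A's parameter is a Python dict, whose keys are
-- unique, so such lists do not encode any dict input and first-match behaviour there is an artifact of
-- the list encoding.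
def Pre_reconstruct_prompt_py (sections : List (String × String)) : Prop :=
  (sections.map Prod.fst).Nodup
instance (sections : List (String × String)) : Decidable (Pre_reconstruct_prompt_py sections) := by
  unfold Pre_reconstruct_prompt_py; infer_instance

def pvWitness_reconstruct_prompt_py : (List (String × String)) :=
  [("scene", "a scene"), ("extra", "tail"), ("voiceover", "")]

def Spec_reconstruct_prompt_py (sections : List (String × String)) (out : String) : Prop := out = reconstruct_prompt_py_alt sections
instance (sections : List (String × String)) (out : String) : Decidable (Spec_reconstruct_prompt_py sections out) := by unfold Spec_reconstruct_prompt_py; infer_instance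

-- ===== CLAIM (what is proved, stated in full; the proofs are below) =====
def Claim_equal_reconstruct_prompt_py : Prop := ∀ (sections : List (String × String)), Dom_reconstruct_prompt_py sections → Pre_reconstruct_prompt_py sections → Spec_reconstruct_prompt_py sections (reconstruct_prompt_py sections)

-- ===== LEMMAS AND PROOFS =====

-- priority index of a key: position in the order list, 8 for every other key
def pvKI (k : String) : Nat :=
  if "character" = k then 0 else if "scene" = k then 1 else if "voiceover" = k then 2
  else if "setting_details" = k then 3 else if "camera_direction" = k then 4
  else if "hard_locks" = k then 5 else if "negatives" = k then 6
  else if "main" = k then 7 else 8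

-- contents of bucket j after B's single pass over l
def pvBkt (j : Nat) (l : List (String × String)) : List String :=
  (l.filter (fun kv => pvKI kv.1 == j && kv.2 != "")).map Prod.snd

lemma pvKI_le (k : String) : pvKI k ≤ 8 := by
  unfold pvKI; split_ifs <;> omega

lemma pvIdx_getD (k : String) :
    (((PySem.List.enumerate (["character", "scene", "voiceover", "setting_details",
        "camera_direction", "hard_locks", "negatives", "main"] : List String) 0).foldl
        (fun (d : PySem.Dict String Int) p => d.insert p.2 p.1) PySem.Dict.empty).getD k ((["character", "scene", "voiceover", "setting_details",
        "camera_direction", "hard_locks", "negatives", "main"] : List String).length : Int)).toNat = pvKI k := by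
  rw [show ((PySem.List.enumerate (["character", "scene", "voiceover", "setting_details",
        "camera_direction", "hard_locks", "negatives", "main"] : List String) 0).foldl
        (fun (d : PySem.Dict String Int) p => d.insert p.2 p.1) PySem.Dict.empty)
      = PySem.Dict.mk [("character",0),("scene",1),("voiceover",2),("setting_details",3),
        ("camera_direction",4),("hard_locks",5),("negatives",6),("main",7)] from by decide]
  simp only [PySem.Dict.getD, PySem.Dict.get?_mk_cons, pvKI, beq_iff_eq]
  split_ifs <;> rfl

lemma pvBkt_append (j : Nat) (l : List (String × String)) (x : String × String) :
    pvBkt j (l ++ [x]) = pvBkt j l ++ (if pvKI x.1 == j && x.2 != "" then [x.2] else []) := by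
  simp only [pvBkt, List.filter_append, List.map_append, List.filter_cons, List.filter_nil]
  split_ifs <;> simp

-- B's fold computes exactly the 9 bucket contents
lemma pvBfold (l : List (String × String)) :
    l.foldl (fun bs kv =>
      if kv.2 != "" then bs.set (pvKI kv.1) ((bs.getD (pvKI kv.1) []) ++ [kv.2]) else bs)
      (List.replicate 9 []) = (List.range 9).map (fun j => pvBkt j l) := by
  induction l using List.reverseRecOn with
  | nil => decide
  | append_singleton t x ih =>
    rw [List.foldl_append, ih]
    simp only [List.foldl_cons, List.foldl_nil]
    by_cases hx : (x.2 != "") = true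
    · simp only [hx, if_pos]
      have hgd : ((List.range 9).map (fun j => pvBkt j t)).getD (pvKI x.1) [] = pvBkt (pvKI x.1) t := by
        rw [List.getD_eq_getElem?_getD, List.getElem?_map,
          List.getElem?_range (by have := pvKI_le x.1; omega)]
        rfl
      rw [hgd]
      apply List.ext_getElem
      · simp
      · intro i hi hi2
        simp only [List.length_set, List.length_map, List.length_range] at hi
        rw [List.getElem_set]
        simp only [List.getElem_map, List.getElem_range, pvBkt_append]
        by_cases he : pvKI x.1 = i
        · simp only [he, if_pos, beq_self_eq_true]
          simp [← he, hx]
        · simp only [he, if_neg, not_false_iff]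
          have : (pvKI x.1 == i) = false := by simp [he]
          simp [this]
    · simp only [hx, if_neg, Bool.false_eq_true, not_false_iff]
      apply List.map_congr_left
      intro j _
      rw [pvBkt_append]
      simp [hx]

lemma pvKI_eq_0 (s : String) : (pvKI s == 0) = (s == "character") := by
  unfold pvKI; split_ifs <;> simp_all <;> aesop
lemma pvKI_eq_1 (s : String) : (pvKI s == 1) = (s == "scene") := by
  unfold pvKI; split_ifs <;> simp_all <;> aesop
lemma pvKI_eq_2 (s : String) : (pvKI s == 2) = (s == "voiceover") := by
  unfold pvKI; split_ifs <;> simp_all <;> aesop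
lemma pvKI_eq_3 (s : String) : (pvKI s == 3) = (s == "setting_details") := by
  unfold pvKI; split_ifs <;> simp_all <;> aesop
lemma pvKI_eq_4 (s : String) : (pvKI s == 4) = (s == "camera_direction") := by
  unfold pvKI; split_ifs <;> simp_all <;> aesop
lemma pvKI_eq_5 (s : String) : (pvKI s == 5) = (s == "hard_locks") := by
  unfold pvKI; split_ifs <;> simp_all <;> aesop
lemma pvKI_eq_6 (s : String) : (pvKI s == 6) = (s == "negatives") := by
  unfold pvKI; split_ifs <;> simp_all <;> aesop
lemma pvKI_eq_7 (s : String) : (pvKI s == 7) = (s == "main") := by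
  unfold pvKI; split_ifs <;> simp_all <;> aesop

-- with unique keys, filtering by a key is the first-match lookup
lemma pvFilter_key (l : List (String × String)) (hnd : (l.map Prod.fst).Nodup) (k : String) :
    l.filter (fun kv => kv.1 == k) =
      (match (PySem.Dict.mk l).get? k with | some v => [(k, v)] | none => []) := by
  induction l with
  | nil => simp [PySem.Dict.get?]
  | cons a t ih =>
    simp only [List.map_cons, List.nodup_cons] at hnd
    rw [List.filter_cons, PySem.Dict.get?_mk_cons]
    by_cases h : a.1 = k
    · subst h
      have ht : t.filter (fun kv => kv.1 == a.1) = [] := by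
        rw [List.filter_eq_nil_iff]
        intro kv hkv
        have : kv.1 ∈ t.map Prod.fst := List.mem_map_of_mem hkv
        simp only [beq_iff_eq]
        intro he; exact hnd.1 (he ▸ this)
      simp [ht]
    · have hb : (a.1 == k) = false := by simp [h]
      simp only [hb, Bool.false_eq_true, if_neg, not_false_iff]
      rw [ih hnd.2]

-- one step of A's first loop appends the "cell" of that key
lemma pvStep_cell (d : PySem.Dict String String) (k : String) (acc : List String) :
    (if d.contains k && d.getD k "" != "" then acc ++ [d.getD k ""] else acc) =
      acc ++ (match d.get? k with | some v => if v != "" then [v] else [] | none => []) := by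
  rw [PySem.Dict.contains_eq_isSome_get?, PySem.Dict.getD_eq_get?_getD]
  cases h : d.get? k
  · simp
  · simp only [Option.isSome_some, Option.getD_some, Bool.true_and]
    split_ifs <;> simp_all

-- bucket j (j < 8) is A's cell of the j-th order key
lemma pvBkt_eq_cell (l : List (String × String)) (hnd : (l.map Prod.fst).Nodup)
    (j : Nat) (k : String) (h : ∀ s, (pvKI s == j) = (s == k)) :
    pvBkt j l =
      (match (PySem.Dict.mk l).get? k with | some v => if v != "" then [v] else [] | none => []) := by
  unfold pvBkt
  rw [List.filter_congr (fun kv _ => by rw [h kv.1, Bool.and_comm])]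
  rw [← List.filter_filter, pvFilter_key l hnd k]
  cases (PySem.Dict.mk l).get? k
  · simp
  · simp only [List.filter_cons, List.filter_nil]
    split_ifs <;> simp_all
-- the last bucket holds the non-order sections, in order
lemma pvBkt8 (l : List (String × String)) :
    pvBkt 8 l = (l.filter (fun kv =>
      !(["character", "scene", "voiceover", "setting_details",
         "camera_direction", "hard_locks", "negatives", "main"] : List String).contains kv.1
        && kv.2 != "")).map Prod.snd := by
  have h8 : ∀ s : String, (pvKI s == 8) = !(["character", "scene", "voiceover", "setting_details",
      "camera_direction", "hard_locks", "negatives", "main"] : List String).contains s := by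
    intro s; unfold pvKI; split_ifs <;> simp_all [eq_comm]
  unfold pvBkt
  rw [List.filter_congr (fun kv _ => by rw [h8 kv.1])]

-- ===== VERDICT (by name: the statement is the Claim_ definition above) =====
theorem reconstruct_prompt_py_spec : Claim_equal_reconstruct_prompt_py := by
  intro l _ hnd
  unfold Pre_reconstruct_prompt_py at hnd
  unfold Spec_reconstruct_prompt_py
  unfold reconstruct_prompt_py reconstruct_prompt_py_alt
  simp only [List.foldl_cons, List.foldl_nil, pvStep_cell, PySem.List.foldl_append_if]
  rw [show List.replicate ((["character", "scene", "voiceover", "setting_details",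
      "camera_direction", "hard_locks", "negatives", "main"] : List String).length + 1)
      ([] : List String) = List.replicate 9 [] from rfl]
  rw [show (fun (bs : List (List String)) (kv : String × String) =>
      if kv.2 != "" then
        bs.set (((PySem.List.enumerate (["character", "scene", "voiceover", "setting_details",
            "camera_direction", "hard_locks", "negatives", "main"] : List String) 0).foldl
            (fun (d : PySem.Dict String Int) p => d.insert p.2 p.1) PySem.Dict.empty).getD kv.1
            ((["character", "scene", "voiceover", "setting_details",
              "camera_direction", "hard_locks", "negatives", "main"] : List String).length : Int)).toNat
          ((bs.getD (((PySem.List.enumerate (["character", "scene", "voiceover", "setting_details",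
            "camera_direction", "hard_locks", "negatives", "main"] : List String) 0).foldl
            (fun (d : PySem.Dict String Int) p => d.insert p.2 p.1) PySem.Dict.empty).getD kv.1
            ((["character", "scene", "voiceover", "setting_details",
              "camera_direction", "hard_locks", "negatives", "main"] : List String).length : Int)).toNat []) ++ [kv.2])
      else bs)
    = (fun bs kv =>
        if kv.2 != "" then bs.set (pvKI kv.1) ((bs.getD (pvKI kv.1) []) ++ [kv.2]) else bs) from by
    funext bs kv
    rw [pvIdx_getD]]
  rw [pvBfold l]
  rw [show List.range 9 = [0,1,2,3,4,5,6,7,8] from rfl]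
  simp only [List.map_cons, List.map_nil, List.flatten_cons, List.flatten_nil]
  rw [pvBkt_eq_cell l hnd 0 "character" pvKI_eq_0, pvBkt_eq_cell l hnd 1 "scene" pvKI_eq_1,
    pvBkt_eq_cell l hnd 2 "voiceover" pvKI_eq_2, pvBkt_eq_cell l hnd 3 "setting_details" pvKI_eq_3,
    pvBkt_eq_cell l hnd 4 "camera_direction" pvKI_eq_4, pvBkt_eq_cell l hnd 5 "hard_locks" pvKI_eq_5,
    pvBkt_eq_cell l hnd 6 "negatives" pvKI_eq_6, pvBkt_eq_cell l hnd 7 "main" pvKI_eq_7, pvBkt8 l]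
  simp [List.append_assoc]
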